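-- pv_equiv track=rewrite | github.com/samirelanduk/ZincBindDB | core/utilities.py | get_spacers
-- ===== SOURCE A (Python) =====
-- def get_spacers(sequence):
--     spacers = []
--     count = None
--     for char in sequence:
--         if count is not None: count += 1
--         if char.istitle():
--             if count is not None: spacers.append(str(count - 1))
--             count = 0
--     return ", ".join(spacers)
-- ===== SOURCE B (Python) =====
-- def get_spacers(sequence):
--     pos = [i for i, c in enumerate(sequence) if c.istitle()]
--     return ", ".join(str(b - a - 1) for a, b in zip(pos, pos[1:]))
-- ===== Notes on version B (the rewrite author's own statement) =====
-- stated objective: simpler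
-- what changed: Replaced the None-sentinel running-counter state machine with a two-phase decomposition: collect the indices of title-case characters, then join the pairwise differences of consecutive indices.
import Mathlib
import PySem

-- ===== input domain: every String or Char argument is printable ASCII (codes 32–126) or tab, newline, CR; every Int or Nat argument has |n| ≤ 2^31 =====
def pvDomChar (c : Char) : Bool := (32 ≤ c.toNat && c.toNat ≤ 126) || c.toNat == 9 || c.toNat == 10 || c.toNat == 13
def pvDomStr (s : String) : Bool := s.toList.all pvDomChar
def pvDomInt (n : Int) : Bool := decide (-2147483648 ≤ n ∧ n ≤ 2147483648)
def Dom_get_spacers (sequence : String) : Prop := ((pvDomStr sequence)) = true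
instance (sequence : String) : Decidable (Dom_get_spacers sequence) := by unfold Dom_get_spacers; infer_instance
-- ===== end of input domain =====

-- B replaces A's None-sentinel running-counter state machine by an index-list-then-pairwise-difference
-- decomposition (objective: simpler). Return values proved equal on the whole ASCII domain.
-- ===== PORT A =====
-- char.istitle() on a single ASCII character is exactly 'c is an uppercase letter' = PySem.Chars.isupper c.
def pvStepA (acc : List String × Option Int) (c : Char) : List String × Option Int :=
  let count : Option Int := acc.2.map (· + 1)
  if PySem.Chars.isupper c then
    match count with
    | some k => (acc.1 ++ [PySem.Int.toStr (k - 1)], some 0)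
    | none => (acc.1, some 0)
  else (acc.1, count)

def get_spacers (sequence : String) : String :=
  PySem.Str.join ", " (sequence.toList.foldl pvStepA ([], none)).1

-- ===== PORT B =====
def get_spacers_alt (sequence : String) : String :=
  let pos : List Int :=
    ((PySem.List.enumerate sequence.toList).filter (fun p => PySem.Chars.isupper p.2)).map (·.1)
  PySem.Str.join ", " (List.zipWith (fun a b => PySem.Int.toStr (b - a - 1)) pos (pos.drop 1))

-- ===== PRECONDITION & SPEC =====
def Spec_get_spacers (sequence : String) (out : String) : Prop := out = get_spacers_alt sequence
instance (sequence : String) (out : String) : Decidable (Spec_get_spacers sequence out) := by unfold Spec_get_spacers; infer_instance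

-- ===== CLAIM (what is proved, stated in full; the proofs are below) =====
def Claim_equal_get_spacers : Prop := ∀ (sequence : String), Dom_get_spacers sequence → Spec_get_spacers sequence (get_spacers sequence)

-- ===== LEMMAS AND PROOFS =====
-- positions (offset n) of uppercase characters
def pvPos (n : Int) : List Char → List Int
  | [] => []
  | c :: cs => if PySem.Chars.isupper c then n :: pvPos (n + 1) cs else pvPos (n + 1) cs

-- pairwise gaps of a list of positions
def pvGaps (xs : List Int) : List Int := List.zipWith (fun a b => b - a - 1) xs (xs.drop 1)

lemma pvGaps_cons (a b : Int) (t : List Int) :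
    pvGaps (a :: b :: t) = (b - a - 1) :: pvGaps (b :: t) := rfl

lemma pvPos_enumerate (cs : List Char) (n : Int) :
    ((PySem.List.enumerate cs n).filter (fun p => PySem.Chars.isupper p.2)).map (·.1)
      = pvPos n cs := by
  induction cs generalizing n with
  | nil => simp [PySem.List.enumerate_nil, pvPos]
  | cons c cs ih =>
    simp only [PySem.List.enumerate_cons, List.filter_cons, pvPos]
    by_cases h : PySem.Chars.isupper c = true
    · simp [h, ih]
    · simp [h, ih]

lemma pvFold_some (cs : List Char) (s : List String) (k n p : Int) (hp : p = n - 1 - k) :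
    (cs.foldl pvStepA (s, some k)).1
      = s ++ (pvGaps (p :: pvPos n cs)).map PySem.Int.toStr := by
  induction cs generalizing s k n p with
  | nil => simp [pvPos, pvGaps]
  | cons c cs ih =>
    by_cases h : PySem.Chars.isupper c = true
    · have hstep : pvStepA (s, some k) c = (s ++ [PySem.Int.toStr (k + 1 - 1)], some 0) := by
        simp [pvStepA, h]
      have hpos : pvPos n (c :: cs) = n :: pvPos (n + 1) cs := by simp [pvPos, h]
      have hval : n - p - 1 = k + 1 - 1 := by rw [hp]; ring
      rw [List.foldl_cons, hstep, ih (s ++ [PySem.Int.toStr (k + 1 - 1)]) 0 (n + 1) n (by ring),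
        hpos, pvGaps_cons, hval]
      simp
    · have hstep : pvStepA (s, some k) c = (s, some (k + 1)) := by simp [pvStepA, h]
      have hpos : pvPos n (c :: cs) = pvPos (n + 1) cs := by simp [pvPos, h]
      rw [List.foldl_cons, hstep, ih s (k + 1) (n + 1) p (by rw [hp]; ring), hpos]

lemma pvFold_none (cs : List Char) (s : List String) (n : Int) :
    (cs.foldl pvStepA (s, none)).1 = s ++ (pvGaps (pvPos n cs)).map PySem.Int.toStr := by
  induction cs generalizing s n with
  | nil => simp [pvPos, pvGaps]
  | cons c cs ih =>
    by_cases h : PySem.Chars.isupper c = true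
    · have hstep : pvStepA (s, none) c = (s, some 0) := by simp [pvStepA, h]
      have hpos : pvPos n (c :: cs) = n :: pvPos (n + 1) cs := by simp [pvPos, h]
      rw [List.foldl_cons, hstep, pvFold_some cs s 0 (n + 1) n (by ring), hpos]
    · have hstep : pvStepA (s, none) c = (s, none) := by simp [pvStepA, h]
      have hpos : pvPos n (c :: cs) = pvPos (n + 1) cs := by simp [pvPos, h]
      rw [List.foldl_cons, hstep, ih s (n + 1), hpos]

-- ===== VERDICT (by name: the statement is the Claim_ definition above) =====
theorem get_spacers_spec : Claim_equal_get_spacers := by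
  intro sequence _
  unfold Spec_get_spacers get_spacers get_spacers_alt
  rw [pvFold_none sequence.toList [] 0, pvPos_enumerate]
  simp [pvGaps]
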